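-- pv_equiv track=rewrite | github.com/rebuilder945/FL_research | ast_research/python_code_5.23/lastterm_page7/success_code/王卫东-3225-2023-05-24_16_57_35.py | work
-- ===== SOURCE A (Python) =====
-- def work(a) :
--     dic={0:1}
--     for x in range(1,a+1):
--         c=1
--         for y in range(1,x+1):
--             c=c*y
--         dic[x]=c
--     return dic
-- ===== SOURCE B (Python) =====
-- def work(a):
--     # Build the (key, factorial) pairs as a flat list with a while loop carrying a
--     # running product, then turn it into a dict in one shot (O(a) multiplications).
--     pairs = [(0, 1)]
--     x = 1
--     c = 1
--     while x <= a:
--         c *= x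
--         pairs.append((x, c))
--         x += 1
--     return dict(pairs)
-- ===== Notes on version B (the rewrite author's own statement) =====
-- stated objective: faster
-- what changed: Replaces the range-for loop that recomputes each factorial from scratch with a nested loop and per-key dict inserts by a while loop carrying a running product that appends (key, value) pairs to a plain list, converted to a dict once at the end.
import Mathlib
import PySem

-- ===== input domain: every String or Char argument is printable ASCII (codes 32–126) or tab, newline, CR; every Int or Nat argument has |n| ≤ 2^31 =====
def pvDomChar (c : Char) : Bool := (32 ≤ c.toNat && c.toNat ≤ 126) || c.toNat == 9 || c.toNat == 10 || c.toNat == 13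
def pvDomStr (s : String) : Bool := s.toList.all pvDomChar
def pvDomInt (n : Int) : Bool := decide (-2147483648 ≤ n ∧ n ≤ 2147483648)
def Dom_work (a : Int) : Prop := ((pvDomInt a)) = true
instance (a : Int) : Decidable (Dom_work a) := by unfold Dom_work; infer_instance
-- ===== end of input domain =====

-- B builds the (key, factorial) pairs as a flat list with a while loop carrying a
-- running product and converts it to a dict once at the end; objective: faster
-- (O(a) multiplications instead of A's O(a^2)).

-- ===== PORT A =====
def work (a : Int) : List (Int × Int) :=
  ((PySem.List.pyRange 1 (a + 1) 1).foldl
    (fun dic x =>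
      dic.insert x ((PySem.List.pyRange 1 (x + 1) 1).foldl (fun c y => c * y) 1))
    (PySem.Dict.ofList [((0 : Int), (1 : Int))])).items

-- ===== PORT B =====
-- while x <= a: the loop runs (a - x + 1).toNat more times; recursion on that count.
def workAltLoop : Nat → Int → Int → List (Int × Int)
  | 0, _, _ => []
  | n + 1, x, c =>
    let c' := c * x
    (x, c') :: workAltLoop n (x + 1) c'

def work_alt (a : Int) : List (Int × Int) :=
  (PySem.Dict.ofList (((0 : Int), (1 : Int)) :: workAltLoop a.toNat 1 1)).items

-- ===== PRECONDITION & SPEC =====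
def Spec_work (a : Int) (out : List (Int × Int)) : Prop := out = work_alt a
instance (a : Int) (out : List (Int × Int)) : Decidable (Spec_work a out) := by unfold Spec_work; infer_instance

-- ===== CLAIM (what is proved, stated in full; the proofs are below) =====
def Claim_equal_work : Prop := ∀ (a : Int), Dom_work a → Spec_work a (work a)

-- ===== LEMMAS AND PROOFS =====

def pvFact (x : Int) : Int := (PySem.List.pyRange 1 (x + 1) 1).foldl (fun c y => c * y) 1

theorem pvFact_succ (n : Nat) :
    pvFact ((n : Int) + 1) = pvFact n * ((n : Int) + 1) := by
  unfold pvFact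
  rw [PySem.List.pyRange_one_succ_right (by exact_mod_cast Nat.le_add_left 1 n), List.foldl_append]
  simp

theorem workAltLoop_eq (n : Nat) : ∀ (m : Nat),
    workAltLoop n ((m : Int) + 1) (pvFact m)
      = (PySem.List.pyRange ((m : Int) + 1) ((m : Int) + 1 + n) 1).map
          (fun k => (k, pvFact k)) := by
  induction n with
  | zero =>
    intro m
    rw [PySem.List.pyRange_one_eq_nil (by omega)]
    rfl
  | succ n ih =>
    intro m
    rw [PySem.List.pyRange_one_cons (by omega)]
    simp only [workAltLoop, List.map_cons]
    have hf := (pvFact_succ m).symm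
    have ih' := ih (m + 1)
    push_cast at ih' ⊢
    rw [hf, ih']
    ring_nf

-- ===== VERDICT (by name: the statement is the Claim_ definition above) =====
theorem work_spec : Claim_equal_work := by
  intro a _
  unfold Spec_work work work_alt
  -- A's loop inserts fresh, strictly increasing keys into {0: 1}: its items append.
  have hA := PySem.Dict.items_foldl_insert_fresh
      (PySem.List.pyRange 1 (a + 1) 1) (fun x => x)
      (fun x => (PySem.List.pyRange 1 (x + 1) 1).foldl (fun c y => c * y) 1)
      (PySem.Dict.ofList [((0 : Int), (1 : Int))])
      (by
        intro x hx
        have := (PySem.List.mem_pyRange_one).1 hx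
        rw [show PySem.Dict.ofList [((0 : Int), (1 : Int))]
              = PySem.Dict.mk [((0 : Int), (1 : Int))] from rfl,
           PySem.Dict.contains_mk]
        simp
        omega)
      (by simpa using PySem.List.nodup_pyRange_one 1 (a + 1))
  simp only [] at hA
  rw [hA]
  -- B's dict is built from pairs with distinct keys: ofList keeps them as items.
  by_cases h : a ≤ 0
  · rw [PySem.List.pyRange_one_eq_nil (by omega : a + 1 ≤ 1),
        show a.toNat = 0 by omega]
    rfl
  · have ha : (a.toNat : Int) = a := by omega
    have hloop := workAltLoop_eq a.toNat 0
    simp only [Nat.cast_zero, zero_add] at hloop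
    rw [show pvFact 0 = 1 from rfl] at hloop
    rw [hloop, ha, show (1 + a : Int) = a + 1 from by ring]
    have hB := PySem.Dict.items_foldl_insert_fresh
        ((((0 : Int), (1 : Int))) :: (PySem.List.pyRange 1 (a + 1) 1).map (fun k => (k, pvFact k)))
        (fun p => p.1) (fun p => p.2) PySem.Dict.empty
        (by intro p _; exact PySem.Dict.contains_empty _)
        (by
          simp only [List.map_cons, List.map_map]
          refine List.nodup_cons.2 ⟨?_, ?_⟩
          · intro hmem
            rcases List.mem_map.1 hmem with ⟨k, hk, hk0⟩
            have := (PySem.List.mem_pyRange_one).1 hk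
            simp at hk0
            omega
          · have hmap : List.map ((fun p : Int × Int => p.1) ∘ fun k => (k, pvFact k))
                (PySem.List.pyRange 1 (a + 1) 1) = PySem.List.pyRange 1 (a + 1) 1 := by
              simp [Function.comp_def]
            rw [hmap]
            exact PySem.List.nodup_pyRange_one 1 (a + 1))
    simp only [] at hB
    rw [show PySem.Dict.ofList ((((0 : Int), (1 : Int))) :: (PySem.List.pyRange 1 (a + 1) 1).map (fun k => (k, pvFact k)))
          = List.foldl (fun acc p => acc.insert p.1 p.2) PySem.Dict.empty
              ((((0 : Int), (1 : Int))) :: (PySem.List.pyRange 1 (a + 1) 1).map (fun k => (k, pvFact k))) from rfl,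
       hB]
    simp [pvFact, Function.comp_def,
      show (PySem.Dict.ofList [((0 : Int), (1 : Int))]).items = [((0 : Int), (1 : Int))] from rfl,
      show (PySem.Dict.empty : PySem.Dict Int Int).items = [] from rfl]
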